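-- pv_equiv track=rewrite | github.com/swami086/Zovark_swami | worker/tools/enrichment.py | _assess_kill_chain
-- ===== SOURCE A (Python) =====
-- def _assess_kill_chain(attack_types: list) -> str:
--     """Determine kill chain stage from attack type progression."""
--     stages = {
--         "reconnaissance": ["port_scan", "network_scan", "vulnerability_scan"],
--         "initial_access": ["phishing", "phishing_investigation", "exploit", "supply_chain"],
--         "execution": ["lolbin_abuse", "powershell_obfuscation", "process_injection", "wmi_lateral"],
--         "persistence": ["dll_sideloading", "registry_modification", "scheduled_task"],
--         "lateral_movement": ["lateral_movement", "lateral_movement_detection", "rdp_tunneling", "pass_the_hash"],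
--         "exfiltration": ["data_exfiltration", "data_exfiltration_detection", "dns_exfiltration"],
--     }
--     type_set = set(t.lower() for t in attack_types)
--     # Return the most advanced stage seen
--     for stage in reversed(list(stages.keys())):
--         if any(t in type_set for t in stages[stage]):
--             return stage
--     if any("brute" in t or "credential" in t or "kerberos" in t or "golden" in t or "dcsync" in t for t in type_set):
--         return "credential_access"
--     return "unknown"
-- ===== SOURCE B (Python) =====
-- _STAGE_BY_PRIORITY = [
--     "credential_access",   # 0
--     "reconnaissance",      # 1
--     "initial_access",      # 2
--     "execution",           # 3
--     "persistence",         # 4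
--     "lateral_movement",    # 5
--     "exfiltration",        # 6
-- ]
--
-- _PRIORITY = {
--     "port_scan": 1, "network_scan": 1, "vulnerability_scan": 1,
--     "phishing": 2, "phishing_investigation": 2, "exploit": 2, "supply_chain": 2,
--     "lolbin_abuse": 3, "powershell_obfuscation": 3, "process_injection": 3, "wmi_lateral": 3,
--     "dll_sideloading": 4, "registry_modification": 4, "scheduled_task": 4,
--     "lateral_movement": 5, "lateral_movement_detection": 5, "rdp_tunneling": 5, "pass_the_hash": 5,
--     "data_exfiltration": 6, "data_exfiltration_detection": 6, "dns_exfiltration": 6,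
-- }
--
-- _CRED_SUBSTRINGS = ("brute", "credential", "kerberos", "golden", "dcsync")
--
--
-- def _priority(t: str) -> int:
--     p = _PRIORITY.get(t)
--     if p is not None:
--         return p
--     if any(s in t for s in _CRED_SUBSTRINGS):
--         return 0
--     return -1
--
--
-- def _assess_kill_chain(attack_types: list) -> str:
--     best = -1
--     for t in attack_types:
--         best = max(best, _priority(t.lower()))
--     return "unknown" if best == -1 else _STAGE_BY_PRIORITY[best]
-- ===== Notes on version B (the rewrite author's own statement) =====
-- stated objective: simpler
-- what changed: Replaces the reversed stage-by-stage membership scan over a lowered set with a single pass over the inputs maintaining the maximum stage-priority index from an inverted keyword-to-priority map (credential substrings rank 0, unknown -1), then maps the max index back to its stage name.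
import Mathlib
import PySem

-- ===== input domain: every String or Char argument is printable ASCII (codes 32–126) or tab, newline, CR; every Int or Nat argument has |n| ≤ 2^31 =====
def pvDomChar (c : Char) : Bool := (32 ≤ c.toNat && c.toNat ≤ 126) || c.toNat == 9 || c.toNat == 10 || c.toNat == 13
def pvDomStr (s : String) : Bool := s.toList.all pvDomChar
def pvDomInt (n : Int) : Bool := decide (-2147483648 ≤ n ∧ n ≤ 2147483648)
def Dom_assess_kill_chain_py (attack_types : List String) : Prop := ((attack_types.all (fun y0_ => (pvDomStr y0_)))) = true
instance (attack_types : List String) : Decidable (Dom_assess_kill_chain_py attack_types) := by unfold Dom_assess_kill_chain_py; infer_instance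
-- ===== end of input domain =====

-- B replaces A's reversed stage-by-stage membership scan with a single pass keeping the
-- maximum stage-priority index from an inverted keyword map (objective: simpler).


-- ===== PORT A =====
-- the module-level 'stages' dict of A, in insertion order
def aStages : PySem.Dict String (List String) := PySem.Dict.ofList
  [ ("reconnaissance", ["port_scan", "network_scan", "vulnerability_scan"])
  , ("initial_access", ["phishing", "phishing_investigation", "exploit", "supply_chain"])
  , ("execution", ["lolbin_abuse", "powershell_obfuscation", "process_injection", "wmi_lateral"])
  , ("persistence", ["dll_sideloading", "registry_modification", "scheduled_task"])
  , ("lateral_movement", ["lateral_movement", "lateral_movement_detection", "rdp_tunneling", "pass_the_hash"])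
  , ("exfiltration", ["data_exfiltration", "data_exfiltration_detection", "dns_exfiltration"]) ]

def assess_kill_chain_py (attack_types : List String) : String :=
  let type_set : PySem.Set String := PySem.Set.ofList (attack_types.map PySem.Str.lower)
  -- for stage in reversed(list(stages.keys())): if any(t in type_set …): return stage
  match (aStages.keys.reverse).find? (fun stage =>
      (aStages.getD stage []).any (fun t => PySem.Set.contains type_set t)) with
  | some stage => stage
  | none =>
    -- iterates over the set; result is order-independent (an 'any')
    if type_set.any (fun t => PySem.Str.isIn "brute" t || PySem.Str.isIn "credential" t ||
        PySem.Str.isIn "kerberos" t || PySem.Str.isIn "golden" t || PySem.Str.isIn "dcsync" t)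
      then "credential_access" else "unknown"

-- ===== PORT B =====
def bStageByPriority : List String :=
  ["credential_access", "reconnaissance", "initial_access", "execution",
   "persistence", "lateral_movement", "exfiltration"]

def bPriorityMap : PySem.Dict String Int := PySem.Dict.ofList
  [ ("port_scan", 1), ("network_scan", 1), ("vulnerability_scan", 1)
  , ("phishing", 2), ("phishing_investigation", 2), ("exploit", 2), ("supply_chain", 2)
  , ("lolbin_abuse", 3), ("powershell_obfuscation", 3), ("process_injection", 3), ("wmi_lateral", 3)
  , ("dll_sideloading", 4), ("registry_modification", 4), ("scheduled_task", 4)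
  , ("lateral_movement", 5), ("lateral_movement_detection", 5), ("rdp_tunneling", 5), ("pass_the_hash", 5)
  , ("data_exfiltration", 6), ("data_exfiltration_detection", 6), ("dns_exfiltration", 6) ]

def bCredSubstrings : List String := ["brute", "credential", "kerberos", "golden", "dcsync"]

def bPriority (t : String) : Int :=
  match bPriorityMap.get? t with
  | some p => p
  | none => if bCredSubstrings.any (fun s => PySem.Str.isIn s t) then 0 else -1

def assess_kill_chain_py_alt (attack_types : List String) : String :=
  let best := attack_types.foldl (fun b t => max b (bPriority (PySem.Str.lower t))) (-1 : Int)
  if best == -1 then "unknown" else PySem.List.pyGetD bStageByPriority best ""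

-- ===== PRECONDITION & SPEC =====
def Spec_assess_kill_chain_py (attack_types : List String) (out : String) : Prop := out = assess_kill_chain_py_alt attack_types
instance (attack_types : List String) (out : String) : Decidable (Spec_assess_kill_chain_py attack_types out) := by unfold Spec_assess_kill_chain_py; infer_instance

-- ===== CLAIM (what is proved, stated in full; the proofs are below) =====
def Claim_equal_assess_kill_chain_py : Prop := ∀ (attack_types : List String), Dom_assess_kill_chain_py attack_types → Spec_assess_kill_chain_py attack_types (assess_kill_chain_py attack_types)

-- ===== LEMMAS AND PROOFS =====

-- the credential-substring test, as both programs apply it to an element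
def credHit (t : String) : Bool :=
  PySem.Str.isIn "brute" t || PySem.Str.isIn "credential" t ||
    PySem.Str.isIn "kerberos" t || PySem.Str.isIn "golden" t || PySem.Str.isIn "dcsync" t

-- keyword lists of the stages, by priority index
def kwOf : Int → List String
  | 1 => ["port_scan", "network_scan", "vulnerability_scan"]
  | 2 => ["phishing", "phishing_investigation", "exploit", "supply_chain"]
  | 3 => ["lolbin_abuse", "powershell_obfuscation", "process_injection", "wmi_lateral"]
  | 4 => ["dll_sideloading", "registry_modification", "scheduled_task"]
  | 5 => ["lateral_movement", "lateral_movement_detection", "rdp_tunneling", "pass_the_hash"]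
  | 6 => ["data_exfiltration", "data_exfiltration_detection", "dns_exfiltration"]
  | _ => []

lemma get?_char (t : String) (p : Int) (h : bPriorityMap.get? t = some p) :
    1 ≤ p ∧ p ≤ 6 ∧ t ∈ kwOf p := by
  have h2 := PySem.Dict.mem_items_of_get?_eq_some _ h
  rw [show bPriorityMap.items =
    [ ("port_scan", 1), ("network_scan", 1), ("vulnerability_scan", 1)
    , ("phishing", 2), ("phishing_investigation", 2), ("exploit", 2), ("supply_chain", 2)
    , ("lolbin_abuse", 3), ("powershell_obfuscation", 3), ("process_injection", 3), ("wmi_lateral", 3)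
    , ("dll_sideloading", 4), ("registry_modification", 4), ("scheduled_task", 4)
    , ("lateral_movement", 5), ("lateral_movement_detection", 5), ("rdp_tunneling", 5), ("pass_the_hash", 5)
    , ("data_exfiltration", 6), ("data_exfiltration_detection", 6), ("dns_exfiltration", 6) ] from by decide] at h2
  fin_cases h2 <;> exact ⟨by decide, by decide, by decide⟩

lemma prio_of_mem_kw (i : Int) (h1 : 1 ≤ i) (h6 : i ≤ 6) (t : String) (ht : t ∈ kwOf i) :
    bPriority t = i := by
  interval_cases i <;> fin_cases ht <;> decide

lemma mem_kw_of_prio (i : Int) (h1 : 1 ≤ i) (t : String) (hp : bPriority t = i) :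
    t ∈ kwOf i := by
  cases hget : bPriorityMap.get? t with
  | some p =>
    simp only [bPriority, hget] at hp
    subst hp
    exact (get?_char t p hget).2.2
  | none =>
    simp only [bPriority, hget] at hp
    split at hp <;> omega

lemma credHit_of_prio_zero (t : String) (hp : bPriority t = 0) : credHit t = true := by
  cases hget : bPriorityMap.get? t with
  | some p =>
    simp only [bPriority, hget] at hp
    have := (get?_char t p hget).1
    omega
  | none =>
    simp only [bPriority, hget] at hp
    split at hp
    · unfold credHit
      next hany =>
        simp only [bCredSubstrings, List.any_cons, List.any_nil, Bool.or_false] at hany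
        simp only [Bool.or_eq_true] at hany ⊢
        tauto
    · omega

lemma prio_nonneg_of_credHit (t : String) (hc : credHit t = true) : 0 ≤ bPriority t := by
  cases hget : bPriorityMap.get? t with
  | some p =>
    simp only [bPriority, hget]
    exact le_trans (by norm_num) (get?_char t p hget).1
  | none =>
    have hany : bCredSubstrings.any (fun s => PySem.Str.isIn s t) = true := by
      unfold credHit at hc
      simp only [bCredSubstrings, List.any_cons, List.any_nil, Bool.or_false]
      simp only [Bool.or_eq_true] at hc ⊢
      tauto
    simp only [bPriority, hget, hany]
    norm_num

lemma prio_le_six (t : String) : bPriority t ≤ 6 := by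
  cases hget : bPriorityMap.get? t with
  | some p => simp only [bPriority, hget]; exact (get?_char t p hget).2.1
  | none => simp only [bPriority, hget]; split <;> omega

-- A's per-stage membership test over the lowered list, as existence of a priority-i element
lemma cond_iff (ls : List String) (i : Int) (h1 : 1 ≤ i) (h6 : i ≤ 6) :
    ((kwOf i).any (fun k => decide (k ∈ ls)) = true) ↔ ∃ t ∈ ls, bPriority t = i := by
  constructor
  · intro h
    obtain ⟨k, hk, hmem⟩ := List.any_eq_true.mp h
    exact ⟨k, by simpa using hmem, prio_of_mem_kw i h1 h6 k hk⟩
  · rintro ⟨t, ht, hp⟩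
    exact List.any_eq_true.mpr ⟨t, mem_kw_of_prio i h1 t hp, by simpa using ht⟩

-- ===== VERDICT (by name: the statement is the Claim_ definition above) =====
theorem assess_kill_chain_py_spec : Claim_equal_assess_kill_chain_py := by
  intro l _
  unfold Spec_assess_kill_chain_py
  set ls : List String := l.map PySem.Str.lower with hls
  set m : Int := (ls.map bPriority).foldl max (-1) with hm
  -- B computes the table entry of m
  have hfold : List.foldl (fun b t => max b (bPriority (PySem.Str.lower t))) (-1 : Int) l
      = List.foldl max (-1) (ls.map bPriority) := by
    rw [hls, List.map_map, List.foldl_map]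
    rfl
  have hB : assess_kill_chain_py_alt l =
      (if m == -1 then "unknown" else PySem.List.pyGetD bStageByPriority m "") := by
    simp only [assess_kill_chain_py_alt]
    rw [hfold, ← hm]
  -- facts about m
  have hub : ∀ t ∈ ls, bPriority t ≤ m := by
    intro t ht
    exact (PySem.List.le_foldl_max (ls.map bPriority) (-1)).2 _ (List.mem_map_of_mem ht)
  have hlo : -1 ≤ m := (PySem.List.le_foldl_max (ls.map bPriority) (-1)).1
  have hmem : m = -1 ∨ ∃ t ∈ ls, bPriority t = m := by
    rcases PySem.List.foldl_max_mem (ls.map bPriority) (-1) with h | h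
    · exact Or.inl h
    · right; obtain ⟨t, ht, he⟩ := List.mem_map.mp h; exact ⟨t, ht, he⟩
  have hhi : m ≤ 6 := by
    rcases hmem with h | ⟨t, _, he⟩
    · omega
    · rw [← he]; exact prio_le_six t
  -- A reduces to a chain of per-stage conditions over ls
  rw [hB]
  simp only [assess_kill_chain_py]
  rw [show aStages.keys.reverse =
    ["exfiltration", "lateral_movement", "persistence", "execution", "initial_access", "reconnaissance"] from by decide]
  simp only [List.find?]
  simp only [show aStages.getD "exfiltration" [] = kwOf 6 from by decide,
      show aStages.getD "lateral_movement" [] = kwOf 5 from by decide,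
      show aStages.getD "persistence" [] = kwOf 4 from by decide,
      show aStages.getD "execution" [] = kwOf 3 from by decide,
      show aStages.getD "initial_access" [] = kwOf 2 from by decide,
      show aStages.getD "reconnaissance" [] = kwOf 1 from by decide]
  simp only [← hls]
  rw [show (fun t => PySem.Str.isIn "brute" t || PySem.Str.isIn "credential" t ||
      PySem.Str.isIn "kerberos" t || PySem.Str.isIn "golden" t || PySem.Str.isIn "dcsync" t) = credHit from rfl]
  have hcontains : ∀ t : String, (PySem.Set.ofList ls).contains t = decide (t ∈ ls) := by
    intro t
    by_cases h : t ∈ ls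
    · simp [PySem.Set.mem_ofList, h]
    · simp [PySem.Set.mem_ofList, h]
  simp only [hcontains]
  have hcredany : (List.any (PySem.Set.ofList ls) credHit = true) ↔ ∃ t ∈ ls, credHit t = true := by
    simp [List.any_eq_true, PySem.Set.mem_ofList]
  have hfalse : ∀ j : Int, 1 ≤ j → j ≤ 6 → m < j →
      ((kwOf j).any (fun k => decide (k ∈ ls))) = false := by
    intro j h1 h6 hj
    rw [Bool.eq_false_iff]
    intro hc
    obtain ⟨t, ht, hp⟩ := (cond_iff ls j h1 h6).mp hc
    have := hub t ht
    omega
  have htrue : 1 ≤ m → m ≤ 6 → ((kwOf m).any (fun k => decide (k ∈ ls))) = true := by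
    intro h1 h6
    rcases hmem with h | ⟨t, ht, hp⟩
    · omega
    · exact (cond_iff ls m h1 h6).mpr ⟨t, ht, hp⟩
  have hcredfalse : m = -1 → List.any (PySem.Set.ofList ls) credHit = false := by
    intro hm1
    rw [Bool.eq_false_iff]
    intro hc
    obtain ⟨t, ht, hcr⟩ := hcredany.mp hc
    have := prio_nonneg_of_credHit t hcr
    have := hub t ht
    omega
  have hcredtrue : m = 0 → List.any (PySem.Set.ofList ls) credHit = true := by
    intro hm0
    rcases hmem with h | ⟨t, ht, hp⟩
    · omega
    · exact hcredany.mpr ⟨t, ht, credHit_of_prio_zero t (by omega)⟩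
  clear_value m ls
  interval_cases m
  · rw [hfalse 6 (by norm_num) (by norm_num) (by norm_num),
        hfalse 5 (by norm_num) (by norm_num) (by norm_num),
        hfalse 4 (by norm_num) (by norm_num) (by norm_num),
        hfalse 3 (by norm_num) (by norm_num) (by norm_num),
        hfalse 2 (by norm_num) (by norm_num) (by norm_num),
        hfalse 1 (by norm_num) (by norm_num) (by norm_num),
        hcredfalse rfl]
    rfl
  · rw [hfalse 6 (by norm_num) (by norm_num) (by norm_num),
        hfalse 5 (by norm_num) (by norm_num) (by norm_num),
        hfalse 4 (by norm_num) (by norm_num) (by norm_num),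
        hfalse 3 (by norm_num) (by norm_num) (by norm_num),
        hfalse 2 (by norm_num) (by norm_num) (by norm_num),
        hfalse 1 (by norm_num) (by norm_num) (by norm_num),
        hcredtrue rfl]
    rfl
  · rw [hfalse 6 (by norm_num) (by norm_num) (by norm_num),
        hfalse 5 (by norm_num) (by norm_num) (by norm_num),
        hfalse 4 (by norm_num) (by norm_num) (by norm_num),
        hfalse 3 (by norm_num) (by norm_num) (by norm_num),
        hfalse 2 (by norm_num) (by norm_num) (by norm_num),
        htrue (by norm_num) (by norm_num)]
    rfl
  · rw [hfalse 6 (by norm_num) (by norm_num) (by norm_num),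
        hfalse 5 (by norm_num) (by norm_num) (by norm_num),
        hfalse 4 (by norm_num) (by norm_num) (by norm_num),
        hfalse 3 (by norm_num) (by norm_num) (by norm_num),
        htrue (by norm_num) (by norm_num)]
    rfl
  · rw [hfalse 6 (by norm_num) (by norm_num) (by norm_num),
        hfalse 5 (by norm_num) (by norm_num) (by norm_num),
        hfalse 4 (by norm_num) (by norm_num) (by norm_num),
        htrue (by norm_num) (by norm_num)]
    rfl
  · rw [hfalse 6 (by norm_num) (by norm_num) (by norm_num),
        hfalse 5 (by norm_num) (by norm_num) (by norm_num),
        htrue (by norm_num) (by norm_num)]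
    rfl
  · rw [hfalse 6 (by norm_num) (by norm_num) (by norm_num),
        htrue (by norm_num) (by norm_num)]
    rfl
  · rw [htrue (by norm_num) (by norm_num)]
    rfl
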